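-- pv_equiv track=rewrite | github.com/ModelCloud/GPTQModel | scripts/generate_exl3_kernel_map_packed.py | block_domain_values
-- ===== SOURCE A (Python) =====
-- def block_domain_values(mod: int, max_value: int) -> list[int]:
--     values = []
--     value = mod
--     while value <= max_value:
--         if mod == 512:
--             valid = value % 512 == 0
--         elif mod == 256:
--             valid = value % 256 == 0 and value % 512 != 0
--         elif mod == 128:
--             valid = value % 128 == 0 and value % 256 != 0
--         else:
--             raise ValueError(f"unexpected block modulus: {mod}")
--         if valid:
--             values.append(value)
--         value += 128
--     return values
-- ===== SOURCE B (Python) =====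
-- def block_domain_values(mod: int, max_value: int) -> list[int]:
--     if mod > max_value:
--         return []  # no candidate values at all
--     # Each supported block modulus yields an arithmetic progression:
--     # 512 -> every 512; 256 -> odd multiples of 256 (step 512); 128 -> odd multiples of 128 (step 256).
--     steps = {512: 512, 256: 512, 128: 256}
--     if mod not in steps:
--         raise ValueError(f"unexpected block modulus: {mod}")
--     return list(range(mod, max_value + 1, steps[mod]))
-- ===== Notes on version B (the rewrite author's own statement) =====
-- stated objective: simpler
-- what changed: Replaces the step-128 scan with a per-element modulus test by an empty fast-path plus a direct arithmetic progression list(range(mod, max_value+1, step)) with the step read from a modulus-to-step table; Pre_ excludes the inputs (mod not in {128,256,512} and mod <= max_value) on which both programs raise ValueError.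
import Mathlib
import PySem

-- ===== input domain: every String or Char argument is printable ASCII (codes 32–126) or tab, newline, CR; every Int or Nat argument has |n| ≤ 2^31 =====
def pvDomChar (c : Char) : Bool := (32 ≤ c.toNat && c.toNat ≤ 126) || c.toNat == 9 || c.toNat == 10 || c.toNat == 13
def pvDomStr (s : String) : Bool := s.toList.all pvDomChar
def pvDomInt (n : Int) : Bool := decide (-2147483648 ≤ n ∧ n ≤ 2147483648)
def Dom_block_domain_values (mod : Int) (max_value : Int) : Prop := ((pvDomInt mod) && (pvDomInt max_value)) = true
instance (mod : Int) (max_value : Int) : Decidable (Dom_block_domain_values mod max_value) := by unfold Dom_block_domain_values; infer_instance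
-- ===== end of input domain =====

-- B replaces A's step-128 scan with a per-element modulus test by an empty
-- fast-path plus a direct arithmetic-progression range with the step chosen
-- from a modulus-to-step table (simpler); A = B on Pre_ (where A returns).

-- ===== PORT A =====
-- the while loop of A; Python raises ValueError in the final else branch
-- (reached only when value ≤ max_value with mod ∉ {128,256,512}, which Pre_
-- excludes); the port continues with valid = false there.
def blockLoop (mod : Int) (max_value : Int) (value : Int) (values : List Int) : List Int :=
  if _h : value ≤ max_value then
    let valid : Bool :=
      if mod = 512 then value % 512 == 0
      else if mod = 256 then value % 256 == 0 && !(value % 512 == 0)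
      else if mod = 128 then value % 128 == 0 && !(value % 256 == 0)
      else false
    blockLoop mod max_value (value + 128) (if valid then values ++ [value] else values)
  else values
termination_by (max_value + 1 - value).toNat
decreasing_by omega

def block_domain_values (mod : Int) (max_value : Int) : List Int :=
  blockLoop mod max_value mod []

-- ===== PORT B =====
-- empty fast-path when there are no candidates; then table lookup
-- {512:512, 256:512, 128:256} for the step, then list(range(...)).
def block_domain_values_alt (mod : Int) (max_value : Int) : List Int :=
  if max_value < mod then []
  else if mod = 512 ∨ mod = 256 then PySem.List.pyRange mod (max_value + 1) 512
  else if mod = 128 then PySem.List.pyRange mod (max_value + 1) 256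
  else []  -- Python B raises ValueError here (all such inputs are outside Pre_)

-- ===== PRECONDITION & SPEC =====
-- Pre_ excludes exactly the inputs on which A (and B) raises ValueError:
-- mod ∉ {128,256,512} with mod ≤ max_value.
def Pre_block_domain_values (mod : Int) (max_value : Int) : Prop :=
  mod = 512 ∨ mod = 256 ∨ mod = 128 ∨ max_value < mod
instance (mod : Int) (max_value : Int) : Decidable (Pre_block_domain_values mod max_value) := by
  unfold Pre_block_domain_values; infer_instance

def pvWitness_block_domain_values : Int × Int := (512, 2048)

def Spec_block_domain_values (mod : Int) (max_value : Int) (out : List Int) : Prop :=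
  out = block_domain_values_alt mod max_value
instance (mod : Int) (max_value : Int) (out : List Int) : Decidable (Spec_block_domain_values mod max_value out) := by
  unfold Spec_block_domain_values; infer_instance

-- ===== CLAIM (what is proved, stated in full; the proofs are below) =====
def Claim_equal_block_domain_values : Prop := ∀ (mod : Int) (max_value : Int), Dom_block_domain_values mod max_value → Pre_block_domain_values mod max_value → Spec_block_domain_values mod max_value (block_domain_values mod max_value)

-- ===== LEMMAS AND PROOFS =====

lemma pr_nil (a b s : Int) (hs : 0 < s) (h : b ≤ a) : PySem.List.pyRange a b s = [] := by
  rw [PySem.List.pyRange_of_pos _ _ hs, if_neg (by omega)]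
  simp

lemma pr_cons512 (a b : Int) (h : a < b) :
    PySem.List.pyRange a b 512 = a :: PySem.List.pyRange (a + 512) b 512 := by
  rw [PySem.List.pyRange_of_pos _ _ (by norm_num : (0:Int) < 512),
      PySem.List.pyRange_of_pos _ _ (by norm_num : (0:Int) < 512), if_pos h]
  by_cases h2 : a + 512 < b
  · rw [if_pos h2]
    have hn : ((b - a + 512 - 1) / 512).toNat = ((b - (a + 512) + 512 - 1) / 512).toNat + 1 := by
      omega
    rw [hn, List.range_succ_eq_map, List.map_cons, List.map_map]
    refine congrArg₂ _ (by ring) ?_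
    refine List.map_congr_left (fun k _ => ?_)
    simp [Function.comp]; ring
  · rw [if_neg h2]
    have hn : ((b - a + 512 - 1) / 512).toNat = 1 := by omega
    rw [hn]
    simp

lemma pr_cons256 (a b : Int) (h : a < b) :
    PySem.List.pyRange a b 256 = a :: PySem.List.pyRange (a + 256) b 256 := by
  rw [PySem.List.pyRange_of_pos _ _ (by norm_num : (0:Int) < 256),
      PySem.List.pyRange_of_pos _ _ (by norm_num : (0:Int) < 256), if_pos h]
  by_cases h2 : a + 256 < b
  · rw [if_pos h2]
    have hn : ((b - a + 256 - 1) / 256).toNat = ((b - (a + 256) + 256 - 1) / 256).toNat + 1 := by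
      omega
    rw [hn, List.range_succ_eq_map, List.map_cons, List.map_map]
    refine congrArg₂ _ (by ring) ?_
    refine List.map_congr_left (fun k _ => ?_)
    simp [Function.comp]; ring
  · rw [if_neg h2]
    have hn : ((b - a + 256 - 1) / 256).toNat = 1 := by omega
    rw [hn]
    simp

lemma key512 : ∀ (n : Nat) (mv value : Int) (acc : List Int),
    value % 512 = 0 → (mv + 1 - value).toNat ≤ n →
    blockLoop 512 mv value acc = acc ++ PySem.List.pyRange value (mv + 1) 512 := by
  intro n
  induction n with
  | zero =>
    intro mv value acc h hm
    rw [blockLoop, dif_neg (by omega : ¬ value ≤ mv), pr_nil _ _ _ (by norm_num) (by omega)]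
    simp
  | succ n ih =>
    intro mv value acc h hm
    by_cases hv : value ≤ mv
    · rw [blockLoop, dif_pos hv, pr_cons512 value (mv + 1) (by omega)]
      norm_num [h]
      by_cases h1 : value + 128 ≤ mv
      · rw [blockLoop, dif_pos h1]
        norm_num [show ¬ (value + 128) % 512 = 0 by omega]
        by_cases h2 : value + 128 + 128 ≤ mv
        · rw [blockLoop, dif_pos h2]
          norm_num [show ¬ (value + 128 + 128) % 512 = 0 by omega]
          by_cases h3 : value + 128 + 128 + 128 ≤ mv
          · rw [blockLoop, dif_pos h3]
            norm_num [show ¬ (value + 128 + 128 + 128) % 512 = 0 by omega]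
            have heq : value + 128 + 128 + 128 + 128 = value + 512 := by ring
            rw [heq, ih mv (value + 512) (acc ++ [value]) (by omega) (by omega)]
            simp
          · rw [blockLoop, dif_neg h3, pr_nil (value + 512) (mv + 1) 512 (by norm_num) (by omega)]
        · rw [blockLoop, dif_neg h2, pr_nil (value + 512) (mv + 1) 512 (by norm_num) (by omega)]
      · rw [blockLoop, dif_neg h1, pr_nil (value + 512) (mv + 1) 512 (by norm_num) (by omega)]
    · rw [blockLoop, dif_neg hv, pr_nil _ _ _ (by norm_num) (by omega)]
      simp

lemma key256 : ∀ (n : Nat) (mv value : Int) (acc : List Int),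
    value % 512 = 256 → (mv + 1 - value).toNat ≤ n →
    blockLoop 256 mv value acc = acc ++ PySem.List.pyRange value (mv + 1) 512 := by
  intro n
  induction n with
  | zero =>
    intro mv value acc h hm
    rw [blockLoop, dif_neg (by omega : ¬ value ≤ mv), pr_nil _ _ _ (by norm_num) (by omega)]
    simp
  | succ n ih =>
    intro mv value acc h hm
    by_cases hv : value ≤ mv
    · rw [blockLoop, dif_pos hv, pr_cons512 value (mv + 1) (by omega)]
      norm_num [show value % 256 = 0 by omega, show ¬ value % 512 = 0 by omega]
      by_cases h1 : value + 128 ≤ mv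
      · rw [blockLoop, dif_pos h1]
        norm_num [show ¬ (value + 128) % 256 = 0 by omega]
        by_cases h2 : value + 128 + 128 ≤ mv
        · rw [blockLoop, dif_pos h2]
          norm_num [show (value + 128 + 128) % 512 = 0 by omega]
          by_cases h3 : value + 128 + 128 + 128 ≤ mv
          · rw [blockLoop, dif_pos h3]
            norm_num [show ¬ (value + 128 + 128 + 128) % 256 = 0 by omega]
            have heq : value + 128 + 128 + 128 + 128 = value + 512 := by ring
            rw [heq, ih mv (value + 512) (acc ++ [value]) (by omega) (by omega)]
            simp
          · rw [blockLoop, dif_neg h3, pr_nil (value + 512) (mv + 1) 512 (by norm_num) (by omega)]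
        · rw [blockLoop, dif_neg h2, pr_nil (value + 512) (mv + 1) 512 (by norm_num) (by omega)]
      · rw [blockLoop, dif_neg h1, pr_nil (value + 512) (mv + 1) 512 (by norm_num) (by omega)]
    · rw [blockLoop, dif_neg hv, pr_nil _ _ _ (by norm_num) (by omega)]
      simp

lemma key128 : ∀ (n : Nat) (mv value : Int) (acc : List Int),
    value % 256 = 128 → (mv + 1 - value).toNat ≤ n →
    blockLoop 128 mv value acc = acc ++ PySem.List.pyRange value (mv + 1) 256 := by
  intro n
  induction n with
  | zero =>
    intro mv value acc h hm
    rw [blockLoop, dif_neg (by omega : ¬ value ≤ mv), pr_nil _ _ _ (by norm_num) (by omega)]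
    simp
  | succ n ih =>
    intro mv value acc h hm
    by_cases hv : value ≤ mv
    · rw [blockLoop, dif_pos hv, pr_cons256 value (mv + 1) (by omega)]
      norm_num [show value % 128 = 0 by omega, show ¬ value % 256 = 0 by omega]
      by_cases h1 : value + 128 ≤ mv
      · rw [blockLoop, dif_pos h1]
        norm_num [show (value + 128) % 256 = 0 by omega]
        have heq : value + 128 + 128 = value + 256 := by ring
        rw [heq, ih mv (value + 256) (acc ++ [value]) (by omega) (by omega)]
        simp
      · rw [blockLoop, dif_neg h1, pr_nil (value + 256) (mv + 1) 256 (by norm_num) (by omega)]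
    · rw [blockLoop, dif_neg hv, pr_nil _ _ _ (by norm_num) (by omega)]
      simp

-- ===== VERDICT (by name: the statement is the Claim_ definition above) =====
theorem block_domain_values_spec : Claim_equal_block_domain_values := by
  intro mod mv _hdom hpre
  unfold Spec_block_domain_values block_domain_values block_domain_values_alt
  by_cases hm : mv < mod
  · rw [if_pos hm, blockLoop, dif_neg (by omega : ¬ mod ≤ mv)]
  · rw [if_neg hm]
    by_cases h5 : mod = 512
    · subst h5
      rw [if_pos (Or.inl rfl), key512 (mv + 1 - 512).toNat mv 512 [] (by norm_num) (by omega)]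
      simp
    · by_cases h2 : mod = 256
      · subst h2
        rw [if_pos (Or.inr rfl), key256 (mv + 1 - 256).toNat mv 256 [] (by norm_num) (by omega)]
        simp
      · by_cases h1 : mod = 128
        · subst h1
          rw [if_neg (by norm_num), if_pos rfl,
            key128 (mv + 1 - 128).toNat mv 128 [] (by norm_num) (by omega)]
          simp
        · unfold Pre_block_domain_values at hpre
          rcases hpre with h | h | h | h <;> first | exact absurd h h5 | exact absurd h h2 | exact absurd h h1 | exact absurd h hm
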